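/- GENERATED by mk_final_copies.py from the proof of the farm's unit `inverse_mdct.4` (farm:inverse_mdct.4.1: Proof.lean) as the
   re-elaboration sweep compiled it — do not edit. -/
import Asan.CheckWalk
import Vorbis.Spec.MdctUse
import Vorbis.Spec.Units.inverse_mdct_4
open X86 X86.User Asan Vorbis Vorbis.Spec

set_option maxRecDepth 4000
set_option maxHeartbeats 4000000

namespace Vorbis.Spec.inverse_mdct_4

/-- A register whose value is known as a number, as a word equation (what the walker rewrites with). -/
theorem word_of_toNat {w : Word} {x : Nat} (h : w.toNat = x) : w = UInt64.ofNat x := by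
  rw [← h]
  exact UInt64.ofNat_toNat.symm

/-- Two words with the same value are equal. -/
theorem word_eq_of_toNat {a b : Word} (h : a.toNat = b.toNat) : a = b :=
  UInt64.toNat_inj.mp h

set_option maxHeartbeats 40000000 in
/-- Segment 4 of `inverse_mdct` (the step-2 loop, head `loop3` = 0x10971c, line 2730 `while (AA >= A)`; 20 checks per iteration):
from `At4` at the loop head to `At5` at `cut5` = 0x109729. The loop invariant after `t ≤ n / 16` iterations: the five pointers in
closed form (`rbx = A + 4·n2 − 32 − 32 t`, `r13 = v + 4·n4 + 16 t`, `r12 = v + 16 t`, `r14 = u + 4·n4 + 16 t`, `r15 = u + 16 t`), only the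
callees' stack, the four float scratch slots and `buffer[0 .. n)` written since the segment's entry `v`, the shadow untouched.
The body is walked in four quarters; between two quarters the nest of stores is forgotten for the footprint. -/
theorem seg4 (Lay : Layout) (hLay : Lay.hi = 0x1000000) (μ : Microarch) (hμ : UserX.MicroOK μ) (u₀ : State)
    (hcode : HasCodeNat Lay u₀ Vorbis.L.inverse_mdct.entry Vorbis.Code.code_inverse_mdct.nat Vorbis.L.inverse_mdct.size)
    (hload4 : Asan.SmallCheck Lay μ Vorbis.WayInv (Vorbis.CodeOK u₀) [.rax, .rcx, .rdx] 4 Vorbis.L.__asan_load4_noabort.entry)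
    (hstore4 : Asan.SmallCheck Lay μ Vorbis.WayInv (Vorbis.CodeOK u₀) [.rax, .rcx, .rdx] 4 Vorbis.L.__asan_store4_noabort.entry) :
    inverse_mdct.Seg4 Lay μ u₀ := by
  intro others frames len A stored room ysz k c ue ret v hat
  have hb := hat.body
  have he := hb.entry
  v_entry he
  have hp := hb.pre
  clear he_eq he_df he_mx he_sse he_rip he_code he_inv he_retAddr
  -- numbers
  have hn := hp.isBlocksize.facts
  have hnle := hp.n_le
  -- where the three arrays are
  have hLv := inverse_mdct.tmp_live (others := others) (frames := frames) A ue
  have hLA : LiveBytes (A.newTempObj (2 * inverse_mdct.n ue) :: others) frames (inverse_mdct.tabA ue) (2 * inverse_mdct.n ue) :=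
    LiveBytes.of_block (hp.blkLive _ _ hp.tabA_blk) (Nat.le_refl _) (Nat.le_refl _)
  have hLu : LiveBytes (A.newTempObj (2 * inverse_mdct.n ue) :: others) frames (inverse_mdct.buf ue)
      (4 * bsize ue.mem (inverse_mdct.f ue) 1) :=
    LiveBytes.of_block (hp.blkLive _ _ hp.buf_blk) (Nat.le_refl _) (Nat.le_refl _)
  have hbuf : 0x119d40 ≤ inverse_mdct.buf ue ∧ inverse_mdct.buf ue + 4 * bsize ue.mem (inverse_mdct.f ue) 1 ≤ 0xC00000 ∧
      (inverse_mdct.buf ue + 4 * bsize ue.mem (inverse_mdct.f ue) 1 ≤ 0x700000 ∨ 0x800000 ≤ inverse_mdct.buf ue) := by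
    have hw := (LiveBytes.of_inLive (hp.live _ hp.buf_blk)).where_ hp.shadow.inv hp.shadow.offText (by simp only []; omega) (by omega)
    have hs := hp.offStack _ hp.buf_blk
    simp only [] at hw hs
    exact ⟨hw.1, hw.2.1, hs⟩
  have htabA : 0x119d40 ≤ inverse_mdct.tabA ue ∧ inverse_mdct.tabA ue + 2 * inverse_mdct.n ue ≤ 0xC00000 := by
    have hw := (LiveBytes.of_inLive (hp.live _ hp.tabA_blk)).where_ hp.shadow.inv hp.shadow.offText (by simp only []; omega) (by omega)
    simp only [] at hw
    exact ⟨hw.1, hw.2.1⟩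
  have htmp : 0x119d40 ≤ inverse_mdct.tmp A ue ∧ inverse_mdct.tmp A ue + 2 * inverse_mdct.n ue + 32 ≤ 0xC00000 := by
    have hr := hp.tmp_range
    have h1 := hp.ado.ok.AR1
    have h2 := hp.ado.ok.AR2
    have h3 := hp.arenaText
    simp only [Vorbis.L.textHi] at h3
    omega
  -- the loop-head state under a name of its own
  obtain ⟨s, hs⟩ : ∃ s : State, s = v := ⟨v, rfl⟩
  have w_rip : s.rip = Vorbis.L.inverse_mdct.loop3 := by
    rw [hs]
    exact hat.rip
  have w_rsp : s.reg .rsp = ue.reg .rsp - 184 := by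
    rw [hs]
    exact hb.rsp
  have hvrbp : v.reg .rbp = ue.reg .rsp - 8 := hb.rbp
  have w_eq : Mem.EqOn Vorbis.L.textLo Vorbis.L.textHi u₀.mem s.mem := by
    rw [hs]
    exact hb.code
  have hdf : s.flags .df = false := by
    rw [hs]
    exact hb.abi.1
  have hmx : s.mxcsr &&& 0x1F80 = 0x1F80 := by
    rw [hs]
    exact hb.abi.2
  have hsse : SseOK s := by
    rw [hs]
    exact Vorbis.sseOK_of_abiInv hb.abi
  have hsame : Mem.SameExcept [⟨(ue.reg .rsp).toNat - 368, (ue.reg .rsp).toNat - 184⟩,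
      ⟨(ue.reg .rsp).toNat - 100, (ue.reg .rsp).toNat - 76⟩,
      ⟨inverse_mdct.buf ue, inverse_mdct.buf ue + 4 * inverse_mdct.n ue⟩] v.mem s.mem := by
    rw [hs]
    exact Mem.SameExcept.refl _ _
  have hun : ShadowUntouched v.mem s.mem := by
    rw [hs]
    exact Mem.EqOn.refl _ _ _
  have aSlot : s.mem.readLE (ue.reg .rsp - 72) 8 = inverse_mdct.tabA ue := by
    rw [hs]
    exact hat.sA.aSlot
  have w_kept : RegsKept [.rax, .rcx, .rdx, .rdi, .rbx, .r12, .r13, .r14, .r15, .rsp] v s := by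
    rw [hs]
    exact RegsKept.refl _ _
  obtain ⟨t, ht, h_rbx, h_r13, h_r12, h_r14, h_r15⟩ : ∃ t : Nat, t ≤ inverse_mdct.n ue / 16 ∧
      s.reg .rbx = UInt64.ofNat (inverse_mdct.tabA ue + 4 * (inverse_mdct.n ue / 2) - 32 - 32 * t) ∧
      s.reg .r13 = UInt64.ofNat (inverse_mdct.tmp A ue + 4 * (inverse_mdct.n ue / 4) + 16 * t) ∧
      s.reg .r12 = UInt64.ofNat (inverse_mdct.tmp A ue + 16 * t) ∧
      s.reg .r14 = UInt64.ofNat (inverse_mdct.buf ue + 4 * (inverse_mdct.n ue / 4) + 16 * t) ∧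
      s.reg .r15 = UInt64.ofNat (inverse_mdct.buf ue + 16 * t) := by
    refine ⟨0, Nat.zero_le _, ?_, ?_, ?_, ?_, ?_⟩
    · rw [hs]
      apply word_of_toNat
      have := hat.rbx
      omega
    · rw [hs]
      exact word_of_toNat hat.r13
    · rw [hs]
      exact word_of_toNat hat.r12
    · rw [hs]
      exact word_of_toNat hat.r14
    · rw [hs]
      exact word_of_toNat hat.r15
  rw [← hs]
  clear hs
  u_loop [t] (fun w => (w.reg .rbx).toNat + 32 - inverse_mdct.tabA ue)
  u_walk hcode [hμ.vendor] until [0x109561, Vorbis.L.inverse_mdct.cut5] span [Vorbis.L.textLo, Vorbis.L.textHi] side (v_side)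
  case check_1094bc =>
    have hun' : ShadowUntouched v.mem s_1094bc.mem := by
      v_untouched
    exact hLv.accSmall hb.shadow hun' _ 4 (by decide) (by u_omega) (by u_omega)
  case check_1094d1 =>
    have hun' : ShadowUntouched v.mem s_1094d1.mem := by
      v_untouched
    exact hLv.accSmall hb.shadow hun' _ 4 (by decide) (by u_omega) (by u_omega)
  case check_1094f3 =>
    have hun' : ShadowUntouched v.mem s_1094f3.mem := by
      v_untouched
    exact hLv.accSmall hb.shadow hun' _ 4 (by decide) (by u_omega) (by u_omega)
  case check_109506 =>
    have hun' : ShadowUntouched v.mem s_109506.mem := by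
      v_untouched
    exact hLv.accSmall hb.shadow hun' _ 4 (by decide) (by u_omega) (by u_omega)
  case check_10952e =>
    have hun' : ShadowUntouched v.mem s_10952e.mem := by
      v_untouched
    exact hLu.accSmall hb.shadow hun' _ 4 (by decide) (by u_omega) (by u_omega)
  case check_109552 =>
    have hun' : ShadowUntouched v.mem s_109552.mem := by
      v_untouched
    exact hLu.accSmall hb.shadow hun' _ 4 (by decide) (by u_omega) (by u_omega)
  · -- 0x109561 (line 2737): the first quarter of the body is done
    -- the memory so far as a footprint, the shadow untouched, DF and the MXCSR masks: the exact nest of stores is forgotten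
    replace hun : ShadowUntouched v.mem s_10955c.mem := by
      v_untouched
    replace hsame : Mem.SameExcept [⟨(ue.reg .rsp).toNat - 368, (ue.reg .rsp).toNat - 184⟩,
        ⟨(ue.reg .rsp).toNat - 100, (ue.reg .rsp).toNat - 76⟩,
        ⟨inverse_mdct.buf ue, inverse_mdct.buf ue + 4 * inverse_mdct.n ue⟩] v.mem s_10955c.mem := by
      u_same
    replace hdf : s_10955c.flags .df = false := by
      rw [w_flags]
      try simp only [X86.User.df_setStatus]
      with_reducible assumption
    replace hmx : s_10955c.mxcsr &&& 0x1F80 = 0x1F80 := by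
      rw [w_mxcsr]
      with_reducible assumption
    replace hsse : SseOK s_10955c := ⟨hmx⟩
    clear w_mem w_flags w_mxcsr
    try clear w_zmm
    try clear w_has_10971c
    try clear w_has_109720
    try clear w_has_109723
    try clear w_has_1094b8
    try clear w_has_1094bc
    try clear w_has_1094c1
    try clear w_has_1094c7
    try clear w_has_1094cc
    try clear w_has_1094d1
    try clear w_has_1094d6
    try clear w_has_1094dd
    try clear w_has_1094e2
    try clear w_has_1094e7
    try clear w_has_1094eb
    try clear w_has_1094f0
    try clear w_has_1094f3
    try clear w_has_1094f8
    try clear w_has_1094fe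
    try clear w_has_109503
    try clear w_has_109506
    try clear w_has_10950b
    try clear w_has_109510
    try clear w_has_109516
    try clear w_has_10951b
    try clear w_has_109520
    try clear w_has_109525
    try clear w_has_10952a
    try clear w_has_10952e
    try clear w_has_109533
    try clear w_has_109538
    try clear w_has_10953e
    try clear w_has_109544
    try clear w_has_10954a
    try clear w_has_10954f
    try clear w_has_109552
    try clear w_has_109557
    try clear w_has_10955c
    try clear w_acc_10971c
    try clear w_acc_109720
    try clear w_acc_109723
    try clear w_acc_1094b8
    try clear w_acc_1094bc
    try clear w_acc_1094c1
    try clear w_acc_1094c7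
    try clear w_acc_1094cc
    try clear w_acc_1094d1
    try clear w_acc_1094d6
    try clear w_acc_1094dd
    try clear w_acc_1094e2
    try clear w_acc_1094e7
    try clear w_acc_1094eb
    try clear w_acc_1094f0
    try clear w_acc_1094f3
    try clear w_acc_1094f8
    try clear w_acc_1094fe
    try clear w_acc_109503
    try clear w_acc_109506
    try clear w_acc_10950b
    try clear w_acc_109510
    try clear w_acc_109516
    try clear w_acc_10951b
    try clear w_acc_109520
    try clear w_acc_109525
    try clear w_acc_10952a
    try clear w_acc_10952e
    try clear w_acc_109533
    try clear w_acc_109538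
    try clear w_acc_10953e
    try clear w_acc_109544
    try clear w_acc_10954a
    try clear w_acc_10954f
    try clear w_acc_109552
    try clear w_acc_109557
    try clear w_acc_10955c
    try clear w_df_10971c
    try clear w_df_109720
    try clear w_df_109723
    try clear w_df_1094b8
    try clear w_df_1094bc
    try clear w_df_1094c1
    try clear w_df_1094c7
    try clear w_df_1094cc
    try clear w_df_1094d1
    try clear w_df_1094d6
    try clear w_df_1094dd
    try clear w_df_1094e2
    try clear w_df_1094e7
    try clear w_df_1094eb
    try clear w_df_1094f0
    try clear w_df_1094f3
    try clear w_df_1094f8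
    try clear w_df_1094fe
    try clear w_df_109503
    try clear w_df_109506
    try clear w_df_10950b
    try clear w_df_109510
    try clear w_df_109516
    try clear w_df_10951b
    try clear w_df_109520
    try clear w_df_109525
    try clear w_df_10952a
    try clear w_df_10952e
    try clear w_df_109533
    try clear w_df_109538
    try clear w_df_10953e
    try clear w_df_109544
    try clear w_df_10954a
    try clear w_df_10954f
    try clear w_df_109552
    try clear w_df_109557
    try clear w_df_10955c
    try clear hmx_10971c
    try clear hmx_109720
    try clear hmx_109723
    try clear hmx_1094b8
    try clear hmx_1094bc
    try clear hmx_1094c1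
    try clear hmx_1094c7
    try clear hmx_1094cc
    try clear hmx_1094d1
    try clear hmx_1094d6
    try clear hmx_1094dd
    try clear hmx_1094e2
    try clear hmx_1094e7
    try clear hmx_1094eb
    try clear hmx_1094f0
    try clear hmx_1094f3
    try clear hmx_1094f8
    try clear hmx_1094fe
    try clear hmx_109503
    try clear hmx_109506
    try clear hmx_10950b
    try clear hmx_109510
    try clear hmx_109516
    try clear hmx_10951b
    try clear hmx_109520
    try clear hmx_109525
    try clear hmx_10952a
    try clear hmx_10952e
    try clear hmx_109533
    try clear hmx_109538
    try clear hmx_10953e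
    try clear hmx_109544
    try clear hmx_10954a
    try clear hmx_10954f
    try clear hmx_109552
    try clear hmx_109557
    try clear hmx_10955c
    try clear x_10971c
    try clear x_109720
    try clear x_109723
    try clear x_1094b8
    try clear x_1094bc
    try clear x_1094c1
    try clear x_1094c7
    try clear x_1094cc
    try clear x_1094d1
    try clear x_1094d6
    try clear x_1094dd
    try clear x_1094e2
    try clear x_1094e7
    try clear x_1094eb
    try clear x_1094f0
    try clear x_1094f3
    try clear x_1094f8
    try clear x_1094fe
    try clear x_109503
    try clear x_109506
    try clear x_10950b
    try clear x_109510
    try clear x_109516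
    try clear x_10951b
    try clear x_109520
    try clear x_109525
    try clear x_10952a
    try clear x_10952e
    try clear x_109533
    try clear x_109538
    try clear x_10953e
    try clear x_109544
    try clear x_10954a
    try clear x_10954f
    try clear x_109552
    try clear x_109557
    try clear x_10955c
    try clear mx_10971c
    try clear mx_109720
    try clear mx_109723
    try clear mx_1094b8
    try clear mx_1094bc
    try clear mx_1094c1
    try clear mx_1094c7
    try clear mx_1094cc
    try clear mx_1094d1
    try clear mx_1094d6
    try clear mx_1094dd
    try clear mx_1094e2
    try clear mx_1094e7
    try clear mx_1094eb
    try clear mx_1094f0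
    try clear mx_1094f3
    try clear mx_1094f8
    try clear mx_1094fe
    try clear mx_109503
    try clear mx_109506
    try clear mx_10950b
    try clear mx_109510
    try clear mx_109516
    try clear mx_10951b
    try clear mx_109520
    try clear mx_109525
    try clear mx_10952a
    try clear mx_10952e
    try clear mx_109533
    try clear mx_109538
    try clear mx_10953e
    try clear mx_109544
    try clear mx_10954a
    try clear mx_10954f
    try clear mx_109552
    try clear mx_109557
    try clear mx_10955c
    try clear s_10971cr
    try clear s_109720r
    try clear s_109723r
    try clear s_1094b8r
    try clear s_1094bcr
    try clear s_1094c1r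
    try clear s_1094c7r
    try clear s_1094ccr
    try clear s_1094d1r
    try clear s_1094d6r
    try clear s_1094ddr
    try clear s_1094e2r
    try clear s_1094e7r
    try clear s_1094ebr
    try clear s_1094f0r
    try clear s_1094f3r
    try clear s_1094f8r
    try clear s_1094fer
    try clear s_109503r
    try clear s_109506r
    try clear s_10950br
    try clear s_109510r
    try clear s_109516r
    try clear s_10951br
    try clear s_109520r
    try clear s_109525r
    try clear s_10952ar
    try clear s_10952er
    try clear s_109533r
    try clear s_109538r
    try clear s_10953er
    try clear s_109544r
    try clear s_10954ar
    try clear s_10954fr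
    try clear s_109552r
    try clear s_109557r
    try clear s_10955cr
    try clear s_10971c
    try clear s_109720
    try clear s_109723
    try clear s_1094b8
    try clear s_1094bc
    try clear s_1094c1
    try clear s_1094c7
    try clear s_1094cc
    try clear s_1094d1
    try clear s_1094d6
    try clear s_1094dd
    try clear s_1094e2
    try clear s_1094e7
    try clear s_1094eb
    try clear s_1094f0
    try clear s_1094f3
    try clear s_1094f8
    try clear s_1094fe
    try clear s_109503
    try clear s_109506
    try clear s_10950b
    try clear s_109510
    try clear s_109516
    try clear s_10951b
    try clear s_109520
    try clear s_109525
    try clear s_10952a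
    try clear s_10952e
    try clear s_109533
    try clear s_109538
    try clear s_10953e
    try clear s_109544
    try clear s_10954a
    try clear s_10954f
    try clear s_109552
    try clear s_109557
    u_walk hcode [hμ.vendor] until [0x1095dd] span [Vorbis.L.textLo, Vorbis.L.textHi] side (v_side)
    case check_109565 =>
      have hun' : ShadowUntouched v.mem s_109565.mem := by
        v_untouched
      exact hLA.accSmall hb.shadow hun' _ 4 (by decide) (by u_omega) (by u_omega)
    case check_10957d =>
      have hun' : ShadowUntouched v.mem s_10957d.mem := by
        v_untouched
      exact hLA.accSmall hb.shadow hun' _ 4 (by decide) (by u_omega) (by u_omega)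
    case check_10959e =>
      have hun' : ShadowUntouched v.mem s_10959e.mem := by
        v_untouched
      exact hLu.accSmall hb.shadow hun' _ 4 (by decide) (by u_omega) (by u_omega)
    case check_1095ce =>
      have hun' : ShadowUntouched v.mem s_1095ce.mem := by
        v_untouched
      exact hLu.accSmall hb.shadow hun' _ 4 (by decide) (by u_omega) (by u_omega)
    -- 0x1095dd (line 2740): the second quarter
    -- the memory so far as a footprint, the shadow untouched, DF and the MXCSR masks: the exact nest of stores is forgotten
    replace hun : ShadowUntouched v.mem s_1095d8.mem := by
      v_untouched
    replace hsame : Mem.SameExcept [⟨(ue.reg .rsp).toNat - 368, (ue.reg .rsp).toNat - 184⟩,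
        ⟨(ue.reg .rsp).toNat - 100, (ue.reg .rsp).toNat - 76⟩,
        ⟨inverse_mdct.buf ue, inverse_mdct.buf ue + 4 * inverse_mdct.n ue⟩] v.mem s_1095d8.mem := by
      u_same
    replace hdf : s_1095d8.flags .df = false := by
      rw [w_flags]
      try simp only [X86.User.df_setStatus]
      with_reducible assumption
    replace hmx : s_1095d8.mxcsr &&& 0x1F80 = 0x1F80 := by
      rw [w_mxcsr]
      with_reducible assumption
    replace hsse : SseOK s_1095d8 := ⟨hmx⟩
    clear w_mem w_flags w_mxcsr
    try clear w_zmm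
    try clear w_has_109561
    try clear w_has_109565
    try clear w_has_10956a
    try clear w_has_10956f
    try clear w_has_109574
    try clear w_has_109579
    try clear w_has_10957d
    try clear w_has_109582
    try clear w_has_109587
    try clear w_has_10958c
    try clear w_has_109591
    try clear w_has_109595
    try clear w_has_10959a
    try clear w_has_10959e
    try clear w_has_1095a3
    try clear w_has_1095a8
    try clear w_has_1095ae
    try clear w_has_1095b3
    try clear w_has_1095b8
    try clear w_has_1095bd
    try clear w_has_1095c2
    try clear w_has_1095c6
    try clear w_has_1095cb
    try clear w_has_1095ce
    try clear w_has_1095d3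
    try clear w_has_1095d8
    try clear w_acc_109561
    try clear w_acc_109565
    try clear w_acc_10956a
    try clear w_acc_10956f
    try clear w_acc_109574
    try clear w_acc_109579
    try clear w_acc_10957d
    try clear w_acc_109582
    try clear w_acc_109587
    try clear w_acc_10958c
    try clear w_acc_109591
    try clear w_acc_109595
    try clear w_acc_10959a
    try clear w_acc_10959e
    try clear w_acc_1095a3
    try clear w_acc_1095a8
    try clear w_acc_1095ae
    try clear w_acc_1095b3
    try clear w_acc_1095b8
    try clear w_acc_1095bd
    try clear w_acc_1095c2
    try clear w_acc_1095c6
    try clear w_acc_1095cb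
    try clear w_acc_1095ce
    try clear w_acc_1095d3
    try clear w_acc_1095d8
    try clear w_df_109561
    try clear w_df_109565
    try clear w_df_10956a
    try clear w_df_10956f
    try clear w_df_109574
    try clear w_df_109579
    try clear w_df_10957d
    try clear w_df_109582
    try clear w_df_109587
    try clear w_df_10958c
    try clear w_df_109591
    try clear w_df_109595
    try clear w_df_10959a
    try clear w_df_10959e
    try clear w_df_1095a3
    try clear w_df_1095a8
    try clear w_df_1095ae
    try clear w_df_1095b3
    try clear w_df_1095b8
    try clear w_df_1095bd
    try clear w_df_1095c2
    try clear w_df_1095c6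
    try clear w_df_1095cb
    try clear w_df_1095ce
    try clear w_df_1095d3
    try clear w_df_1095d8
    try clear hmx_109561
    try clear hmx_109565
    try clear hmx_10956a
    try clear hmx_10956f
    try clear hmx_109574
    try clear hmx_109579
    try clear hmx_10957d
    try clear hmx_109582
    try clear hmx_109587
    try clear hmx_10958c
    try clear hmx_109591
    try clear hmx_109595
    try clear hmx_10959a
    try clear hmx_10959e
    try clear hmx_1095a3
    try clear hmx_1095a8
    try clear hmx_1095ae
    try clear hmx_1095b3
    try clear hmx_1095b8
    try clear hmx_1095bd
    try clear hmx_1095c2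
    try clear hmx_1095c6
    try clear hmx_1095cb
    try clear hmx_1095ce
    try clear hmx_1095d3
    try clear hmx_1095d8
    try clear x_109561
    try clear x_109565
    try clear x_10956a
    try clear x_10956f
    try clear x_109574
    try clear x_109579
    try clear x_10957d
    try clear x_109582
    try clear x_109587
    try clear x_10958c
    try clear x_109591
    try clear x_109595
    try clear x_10959a
    try clear x_10959e
    try clear x_1095a3
    try clear x_1095a8
    try clear x_1095ae
    try clear x_1095b3
    try clear x_1095b8
    try clear x_1095bd
    try clear x_1095c2
    try clear x_1095c6
    try clear x_1095cb
    try clear x_1095ce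
    try clear x_1095d3
    try clear x_1095d8
    try clear mx_109561
    try clear mx_109565
    try clear mx_10956a
    try clear mx_10956f
    try clear mx_109574
    try clear mx_109579
    try clear mx_10957d
    try clear mx_109582
    try clear mx_109587
    try clear mx_10958c
    try clear mx_109591
    try clear mx_109595
    try clear mx_10959a
    try clear mx_10959e
    try clear mx_1095a3
    try clear mx_1095a8
    try clear mx_1095ae
    try clear mx_1095b3
    try clear mx_1095b8
    try clear mx_1095bd
    try clear mx_1095c2
    try clear mx_1095c6
    try clear mx_1095cb
    try clear mx_1095ce
    try clear mx_1095d3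
    try clear mx_1095d8
    try clear s_109561r
    try clear s_109565r
    try clear s_10956ar
    try clear s_10956fr
    try clear s_109574r
    try clear s_109579r
    try clear s_10957dr
    try clear s_109582r
    try clear s_109587r
    try clear s_10958cr
    try clear s_109591r
    try clear s_109595r
    try clear s_10959ar
    try clear s_10959er
    try clear s_1095a3r
    try clear s_1095a8r
    try clear s_1095aer
    try clear s_1095b3r
    try clear s_1095b8r
    try clear s_1095bdr
    try clear s_1095c2r
    try clear s_1095c6r
    try clear s_1095cbr
    try clear s_1095cer
    try clear s_1095d3r
    try clear s_1095d8r
    try clear s_109561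
    try clear s_109565
    try clear s_10956a
    try clear s_10956f
    try clear s_109574
    try clear s_109579
    try clear s_10957d
    try clear s_109582
    try clear s_109587
    try clear s_10958c
    try clear s_109591
    try clear s_109595
    try clear s_10959a
    try clear s_10959e
    try clear s_1095a3
    try clear s_1095a8
    try clear s_1095ae
    try clear s_1095b3
    try clear s_1095b8
    try clear s_1095bd
    try clear s_1095c2
    try clear s_1095c6
    try clear s_1095cb
    try clear s_1095ce
    try clear s_1095d3
    u_walk hcode [hμ.vendor] until [0x10968d] span [Vorbis.L.textLo, Vorbis.L.textHi] side (v_side)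
    case check_1095e1 =>
      have hun' : ShadowUntouched v.mem s_1095e1.mem := by
        v_untouched
      exact hLv.accSmall hb.shadow hun' _ 4 (by decide) (by u_omega) (by u_omega)
    case check_1095f6 =>
      have hun' : ShadowUntouched v.mem s_1095f6.mem := by
        v_untouched
      exact hLv.accSmall hb.shadow hun' _ 4 (by decide) (by u_omega) (by u_omega)
    case check_109619 =>
      have hun' : ShadowUntouched v.mem s_109619.mem := by
        v_untouched
      exact hLv.accSmall hb.shadow hun' _ 4 (by decide) (by u_omega) (by u_omega)
    case check_10962e =>
      have hun' : ShadowUntouched v.mem s_10962e.mem := by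
        v_untouched
      exact hLv.accSmall hb.shadow hun' _ 4 (by decide) (by u_omega) (by u_omega)
    case check_109657 =>
      have hun' : ShadowUntouched v.mem s_109657.mem := by
        v_untouched
      exact hLu.accSmall hb.shadow hun' _ 4 (by decide) (by u_omega) (by u_omega)
    case check_10967d =>
      have hun' : ShadowUntouched v.mem s_10967d.mem := by
        v_untouched
      exact hLu.accSmall hb.shadow hun' _ 4 (by decide) (by u_omega) (by u_omega)
    -- 0x10968d (line 2744): the third quarter
    -- the memory so far as a footprint, the shadow untouched, DF and the MXCSR masks: the exact nest of stores is forgotten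
    replace hun : ShadowUntouched v.mem s_109687.mem := by
      v_untouched
    replace hsame : Mem.SameExcept [⟨(ue.reg .rsp).toNat - 368, (ue.reg .rsp).toNat - 184⟩,
        ⟨(ue.reg .rsp).toNat - 100, (ue.reg .rsp).toNat - 76⟩,
        ⟨inverse_mdct.buf ue, inverse_mdct.buf ue + 4 * inverse_mdct.n ue⟩] v.mem s_109687.mem := by
      u_same
    replace hdf : s_109687.flags .df = false := by
      rw [w_flags]
      try simp only [X86.User.df_setStatus]
      with_reducible assumption
    replace hmx : s_109687.mxcsr &&& 0x1F80 = 0x1F80 := by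
      rw [w_mxcsr]
      with_reducible assumption
    replace hsse : SseOK s_109687 := ⟨hmx⟩
    clear w_mem w_flags w_mxcsr
    try clear w_zmm
    try clear w_has_1095dd
    try clear w_has_1095e1
    try clear w_has_1095e6
    try clear w_has_1095ec
    try clear w_has_1095f1
    try clear w_has_1095f6
    try clear w_has_1095fb
    try clear w_has_109602
    try clear w_has_109607
    try clear w_has_10960c
    try clear w_has_109610
    try clear w_has_109615
    try clear w_has_109619
    try clear w_has_10961e
    try clear w_has_109624
    try clear w_has_109629
    try clear w_has_10962e
    try clear w_has_109633
    try clear w_has_109638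
    try clear w_has_10963f
    try clear w_has_109644
    try clear w_has_109649
    try clear w_has_10964e
    try clear w_has_109653
    try clear w_has_109657
    try clear w_has_10965c
    try clear w_has_109661
    try clear w_has_109667
    try clear w_has_10966e
    try clear w_has_109674
    try clear w_has_109679
    try clear w_has_10967d
    try clear w_has_109682
    try clear w_has_109687
    try clear w_acc_1095dd
    try clear w_acc_1095e1
    try clear w_acc_1095e6
    try clear w_acc_1095ec
    try clear w_acc_1095f1
    try clear w_acc_1095f6
    try clear w_acc_1095fb
    try clear w_acc_109602
    try clear w_acc_109607
    try clear w_acc_10960c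
    try clear w_acc_109610
    try clear w_acc_109615
    try clear w_acc_109619
    try clear w_acc_10961e
    try clear w_acc_109624
    try clear w_acc_109629
    try clear w_acc_10962e
    try clear w_acc_109633
    try clear w_acc_109638
    try clear w_acc_10963f
    try clear w_acc_109644
    try clear w_acc_109649
    try clear w_acc_10964e
    try clear w_acc_109653
    try clear w_acc_109657
    try clear w_acc_10965c
    try clear w_acc_109661
    try clear w_acc_109667
    try clear w_acc_10966e
    try clear w_acc_109674
    try clear w_acc_109679
    try clear w_acc_10967d
    try clear w_acc_109682
    try clear w_acc_109687
    try clear w_df_1095dd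
    try clear w_df_1095e1
    try clear w_df_1095e6
    try clear w_df_1095ec
    try clear w_df_1095f1
    try clear w_df_1095f6
    try clear w_df_1095fb
    try clear w_df_109602
    try clear w_df_109607
    try clear w_df_10960c
    try clear w_df_109610
    try clear w_df_109615
    try clear w_df_109619
    try clear w_df_10961e
    try clear w_df_109624
    try clear w_df_109629
    try clear w_df_10962e
    try clear w_df_109633
    try clear w_df_109638
    try clear w_df_10963f
    try clear w_df_109644
    try clear w_df_109649
    try clear w_df_10964e
    try clear w_df_109653
    try clear w_df_109657
    try clear w_df_10965c
    try clear w_df_109661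
    try clear w_df_109667
    try clear w_df_10966e
    try clear w_df_109674
    try clear w_df_109679
    try clear w_df_10967d
    try clear w_df_109682
    try clear w_df_109687
    try clear hmx_1095dd
    try clear hmx_1095e1
    try clear hmx_1095e6
    try clear hmx_1095ec
    try clear hmx_1095f1
    try clear hmx_1095f6
    try clear hmx_1095fb
    try clear hmx_109602
    try clear hmx_109607
    try clear hmx_10960c
    try clear hmx_109610
    try clear hmx_109615
    try clear hmx_109619
    try clear hmx_10961e
    try clear hmx_109624
    try clear hmx_109629
    try clear hmx_10962e
    try clear hmx_109633
    try clear hmx_109638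
    try clear hmx_10963f
    try clear hmx_109644
    try clear hmx_109649
    try clear hmx_10964e
    try clear hmx_109653
    try clear hmx_109657
    try clear hmx_10965c
    try clear hmx_109661
    try clear hmx_109667
    try clear hmx_10966e
    try clear hmx_109674
    try clear hmx_109679
    try clear hmx_10967d
    try clear hmx_109682
    try clear hmx_109687
    try clear x_1095dd
    try clear x_1095e1
    try clear x_1095e6
    try clear x_1095ec
    try clear x_1095f1
    try clear x_1095f6
    try clear x_1095fb
    try clear x_109602
    try clear x_109607
    try clear x_10960c
    try clear x_109610
    try clear x_109615
    try clear x_109619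
    try clear x_10961e
    try clear x_109624
    try clear x_109629
    try clear x_10962e
    try clear x_109633
    try clear x_109638
    try clear x_10963f
    try clear x_109644
    try clear x_109649
    try clear x_10964e
    try clear x_109653
    try clear x_109657
    try clear x_10965c
    try clear x_109661
    try clear x_109667
    try clear x_10966e
    try clear x_109674
    try clear x_109679
    try clear x_10967d
    try clear x_109682
    try clear x_109687
    try clear mx_1095dd
    try clear mx_1095e1
    try clear mx_1095e6
    try clear mx_1095ec
    try clear mx_1095f1
    try clear mx_1095f6
    try clear mx_1095fb
    try clear mx_109602
    try clear mx_109607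
    try clear mx_10960c
    try clear mx_109610
    try clear mx_109615
    try clear mx_109619
    try clear mx_10961e
    try clear mx_109624
    try clear mx_109629
    try clear mx_10962e
    try clear mx_109633
    try clear mx_109638
    try clear mx_10963f
    try clear mx_109644
    try clear mx_109649
    try clear mx_10964e
    try clear mx_109653
    try clear mx_109657
    try clear mx_10965c
    try clear mx_109661
    try clear mx_109667
    try clear mx_10966e
    try clear mx_109674
    try clear mx_109679
    try clear mx_10967d
    try clear mx_109682
    try clear mx_109687
    try clear s_1095ddr
    try clear s_1095e1r
    try clear s_1095e6r
    try clear s_1095ecr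
    try clear s_1095f1r
    try clear s_1095f6r
    try clear s_1095fbr
    try clear s_109602r
    try clear s_109607r
    try clear s_10960cr
    try clear s_109610r
    try clear s_109615r
    try clear s_109619r
    try clear s_10961er
    try clear s_109624r
    try clear s_109629r
    try clear s_10962er
    try clear s_109633r
    try clear s_109638r
    try clear s_10963fr
    try clear s_109644r
    try clear s_109649r
    try clear s_10964er
    try clear s_109653r
    try clear s_109657r
    try clear s_10965cr
    try clear s_109661r
    try clear s_109667r
    try clear s_10966er
    try clear s_109674r
    try clear s_109679r
    try clear s_10967dr
    try clear s_109682r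
    try clear s_109687r
    try clear s_1095dd
    try clear s_1095e1
    try clear s_1095e6
    try clear s_1095ec
    try clear s_1095f1
    try clear s_1095f6
    try clear s_1095fb
    try clear s_109602
    try clear s_109607
    try clear s_10960c
    try clear s_109610
    try clear s_109615
    try clear s_109619
    try clear s_10961e
    try clear s_109624
    try clear s_109629
    try clear s_10962e
    try clear s_109633
    try clear s_109638
    try clear s_10963f
    try clear s_109644
    try clear s_109649
    try clear s_10964e
    try clear s_109653
    try clear s_109657
    try clear s_10965c
    try clear s_109661
    try clear s_109667
    try clear s_10966e
    try clear s_109674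
    try clear s_109679
    try clear s_10967d
    try clear s_109682
    u_walk hcode [hμ.vendor] until [Vorbis.L.inverse_mdct.loop3] span [Vorbis.L.textLo, Vorbis.L.textHi] side (v_side)
    case check_109690 =>
      have hun' : ShadowUntouched v.mem s_109690.mem := by
        v_untouched
      exact hLA.accSmall hb.shadow hun' _ 4 (by decide) (by u_omega) (by u_omega)
    case check_1096a7 =>
      have hun' : ShadowUntouched v.mem s_1096a7.mem := by
        v_untouched
      exact hLA.accSmall hb.shadow hun' _ 4 (by decide) (by u_omega) (by u_omega)
    case check_1096c8 =>
      have hun' : ShadowUntouched v.mem s_1096c8.mem := by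
        v_untouched
      exact hLu.accSmall hb.shadow hun' _ 4 (by decide) (by u_omega) (by u_omega)
    case check_1096f8 =>
      have hun' : ShadowUntouched v.mem s_1096f8.mem := by
        v_untouched
      exact hLu.accSmall hb.shadow hun' _ 4 (by decide) (by u_omega) (by u_omega)
    -- the back edge: 0x10971c again (line 2730), one more iteration done
    have htlt : t < inverse_mdct.n ue / 16 := by
      u_omega
    -- the memory so far as a footprint, the shadow untouched, DF and the MXCSR masks: the exact nest of stores is forgotten
    replace hun : ShadowUntouched v.mem s_109718.mem := by
      v_untouched
    replace hsame : Mem.SameExcept [⟨(ue.reg .rsp).toNat - 368, (ue.reg .rsp).toNat - 184⟩,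
        ⟨(ue.reg .rsp).toNat - 100, (ue.reg .rsp).toNat - 76⟩,
        ⟨inverse_mdct.buf ue, inverse_mdct.buf ue + 4 * inverse_mdct.n ue⟩] v.mem s_109718.mem := by
      u_same
    replace hdf : s_109718.flags .df = false := by
      rw [w_flags]
      try simp only [X86.User.df_setStatus]
      with_reducible assumption
    replace hmx : s_109718.mxcsr &&& 0x1F80 = 0x1F80 := by
      rw [w_mxcsr]
      with_reducible assumption
    replace hsse : SseOK s_109718 := ⟨hmx⟩
    clear w_mem w_flags w_mxcsr
    try clear w_zmm
    try clear w_has_10968d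
    try clear w_has_109690
    try clear w_has_109695
    try clear w_has_10969a
    try clear w_has_10969e
    try clear w_has_1096a3
    try clear w_has_1096a7
    try clear w_has_1096ac
    try clear w_has_1096b1
    try clear w_has_1096b6
    try clear w_has_1096bb
    try clear w_has_1096bf
    try clear w_has_1096c4
    try clear w_has_1096c8
    try clear w_has_1096cd
    try clear w_has_1096d2
    try clear w_has_1096d8
    try clear w_has_1096dd
    try clear w_has_1096e1
    try clear w_has_1096e6
    try clear w_has_1096eb
    try clear w_has_1096ef
    try clear w_has_1096f4
    try clear w_has_1096f8
    try clear w_has_1096fd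
    try clear w_has_109702
    try clear w_has_109708
    try clear w_has_10970c
    try clear w_has_109710
    try clear w_has_109714
    try clear w_has_109718
    try clear w_acc_10968d
    try clear w_acc_109690
    try clear w_acc_109695
    try clear w_acc_10969a
    try clear w_acc_10969e
    try clear w_acc_1096a3
    try clear w_acc_1096a7
    try clear w_acc_1096ac
    try clear w_acc_1096b1
    try clear w_acc_1096b6
    try clear w_acc_1096bb
    try clear w_acc_1096bf
    try clear w_acc_1096c4
    try clear w_acc_1096c8
    try clear w_acc_1096cd
    try clear w_acc_1096d2
    try clear w_acc_1096d8
    try clear w_acc_1096dd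
    try clear w_acc_1096e1
    try clear w_acc_1096e6
    try clear w_acc_1096eb
    try clear w_acc_1096ef
    try clear w_acc_1096f4
    try clear w_acc_1096f8
    try clear w_acc_1096fd
    try clear w_acc_109702
    try clear w_acc_109708
    try clear w_acc_10970c
    try clear w_acc_109710
    try clear w_acc_109714
    try clear w_acc_109718
    try clear w_df_10968d
    try clear w_df_109690
    try clear w_df_109695
    try clear w_df_10969a
    try clear w_df_10969e
    try clear w_df_1096a3
    try clear w_df_1096a7
    try clear w_df_1096ac
    try clear w_df_1096b1
    try clear w_df_1096b6
    try clear w_df_1096bb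
    try clear w_df_1096bf
    try clear w_df_1096c4
    try clear w_df_1096c8
    try clear w_df_1096cd
    try clear w_df_1096d2
    try clear w_df_1096d8
    try clear w_df_1096dd
    try clear w_df_1096e1
    try clear w_df_1096e6
    try clear w_df_1096eb
    try clear w_df_1096ef
    try clear w_df_1096f4
    try clear w_df_1096f8
    try clear w_df_1096fd
    try clear w_df_109702
    try clear w_df_109708
    try clear w_df_10970c
    try clear w_df_109710
    try clear w_df_109714
    try clear w_df_109718
    try clear hmx_10968d
    try clear hmx_109690
    try clear hmx_109695
    try clear hmx_10969a
    try clear hmx_10969e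
    try clear hmx_1096a3
    try clear hmx_1096a7
    try clear hmx_1096ac
    try clear hmx_1096b1
    try clear hmx_1096b6
    try clear hmx_1096bb
    try clear hmx_1096bf
    try clear hmx_1096c4
    try clear hmx_1096c8
    try clear hmx_1096cd
    try clear hmx_1096d2
    try clear hmx_1096d8
    try clear hmx_1096dd
    try clear hmx_1096e1
    try clear hmx_1096e6
    try clear hmx_1096eb
    try clear hmx_1096ef
    try clear hmx_1096f4
    try clear hmx_1096f8
    try clear hmx_1096fd
    try clear hmx_109702
    try clear hmx_109708
    try clear hmx_10970c
    try clear hmx_109710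
    try clear hmx_109714
    try clear hmx_109718
    try clear x_10968d
    try clear x_109690
    try clear x_109695
    try clear x_10969a
    try clear x_10969e
    try clear x_1096a3
    try clear x_1096a7
    try clear x_1096ac
    try clear x_1096b1
    try clear x_1096b6
    try clear x_1096bb
    try clear x_1096bf
    try clear x_1096c4
    try clear x_1096c8
    try clear x_1096cd
    try clear x_1096d2
    try clear x_1096d8
    try clear x_1096dd
    try clear x_1096e1
    try clear x_1096e6
    try clear x_1096eb
    try clear x_1096ef
    try clear x_1096f4
    try clear x_1096f8
    try clear x_1096fd
    try clear x_109702
    try clear x_109708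
    try clear x_10970c
    try clear x_109710
    try clear x_109714
    try clear x_109718
    try clear mx_10968d
    try clear mx_109690
    try clear mx_109695
    try clear mx_10969a
    try clear mx_10969e
    try clear mx_1096a3
    try clear mx_1096a7
    try clear mx_1096ac
    try clear mx_1096b1
    try clear mx_1096b6
    try clear mx_1096bb
    try clear mx_1096bf
    try clear mx_1096c4
    try clear mx_1096c8
    try clear mx_1096cd
    try clear mx_1096d2
    try clear mx_1096d8
    try clear mx_1096dd
    try clear mx_1096e1
    try clear mx_1096e6
    try clear mx_1096eb
    try clear mx_1096ef
    try clear mx_1096f4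
    try clear mx_1096f8
    try clear mx_1096fd
    try clear mx_109702
    try clear mx_109708
    try clear mx_10970c
    try clear mx_109710
    try clear mx_109714
    try clear mx_109718
    try clear s_10968dr
    try clear s_109690r
    try clear s_109695r
    try clear s_10969ar
    try clear s_10969er
    try clear s_1096a3r
    try clear s_1096a7r
    try clear s_1096acr
    try clear s_1096b1r
    try clear s_1096b6r
    try clear s_1096bbr
    try clear s_1096bfr
    try clear s_1096c4r
    try clear s_1096c8r
    try clear s_1096cdr
    try clear s_1096d2r
    try clear s_1096d8r
    try clear s_1096ddr
    try clear s_1096e1r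
    try clear s_1096e6r
    try clear s_1096ebr
    try clear s_1096efr
    try clear s_1096f4r
    try clear s_1096f8r
    try clear s_1096fdr
    try clear s_109702r
    try clear s_109708r
    try clear s_10970cr
    try clear s_109710r
    try clear s_109714r
    try clear s_109718r
    try clear s_10968d
    try clear s_109690
    try clear s_109695
    try clear s_10969a
    try clear s_10969e
    try clear s_1096a3
    try clear s_1096a7
    try clear s_1096ac
    try clear s_1096b1
    try clear s_1096b6
    try clear s_1096bb
    try clear s_1096bf
    try clear s_1096c4
    try clear s_1096c8
    try clear s_1096cd
    try clear s_1096d2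
    try clear s_1096d8
    try clear s_1096dd
    try clear s_1096e1
    try clear s_1096e6
    try clear s_1096eb
    try clear s_1096ef
    try clear s_1096f4
    try clear s_1096f8
    try clear s_1096fd
    try clear s_109702
    try clear s_109708
    try clear s_10970c
    try clear s_109710
    try clear s_109714
    replace aSlot : s_109718.mem.readLE (ue.reg .rsp - 72) 8 = inverse_mdct.tabA ue := by
      u_frame hat.sA.aSlot
    have ht' : t + 1 ≤ inverse_mdct.n ue / 16 := by
      omega
    have e_rbx : s_109718.reg .rbx =
        UInt64.ofNat (inverse_mdct.tabA ue + 4 * (inverse_mdct.n ue / 2) - 32 - 32 * (t + 1)) := by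
      rw [w_rbx]
      apply word_eq_of_toNat
      u_omega
    have e_r13 : s_109718.reg .r13 =
        UInt64.ofNat (inverse_mdct.tmp A ue + 4 * (inverse_mdct.n ue / 4) + 16 * (t + 1)) := by
      rw [w_r13]
      apply word_eq_of_toNat
      u_omega
    have e_r12 : s_109718.reg .r12 = UInt64.ofNat (inverse_mdct.tmp A ue + 16 * (t + 1)) := by
      rw [w_r12]
      apply word_eq_of_toNat
      u_omega
    have e_r14 : s_109718.reg .r14 =
        UInt64.ofNat (inverse_mdct.buf ue + 4 * (inverse_mdct.n ue / 4) + 16 * (t + 1)) := by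
      rw [w_r14]
      apply word_eq_of_toNat
      u_omega
    have e_r15 : s_109718.reg .r15 = UInt64.ofNat (inverse_mdct.buf ue + 16 * (t + 1)) := by
      rw [w_r15]
      apply word_eq_of_toNat
      u_omega
    u_loop_back [t + 1]
    -- the measure: rbx went down by 32 and was at least `A`
    rw [w_rbx]
    try rw [h_rbx]
    u_omega
  · -- the exit: `cut5` = 0x109729 (line 2757), `AA < A`
    refine ReachVia.done (Or.inl ?_)
    have s_ret : UInt64.ofNat (s_109723.mem.readLE (ue.reg .rsp) 8) = ret := by
      u_frame hb.retSlot
    have s_rbp : UInt64.ofNat (s_109723.mem.readLE (ue.reg .rsp - 8) 8) = ue.reg .rbp := by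
      u_frame hb.rbpSlot
    have s_r15 : UInt64.ofNat (s_109723.mem.readLE (ue.reg .rsp - 16) 8) = ue.reg .r15 := by
      u_frame hb.r15Slot
    have s_r14 : UInt64.ofNat (s_109723.mem.readLE (ue.reg .rsp - 24) 8) = ue.reg .r14 := by
      u_frame hb.r14Slot
    have s_r13 : UInt64.ofNat (s_109723.mem.readLE (ue.reg .rsp - 32) 8) = ue.reg .r13 := by
      u_frame hb.r13Slot
    have s_r12 : UInt64.ofNat (s_109723.mem.readLE (ue.reg .rsp - 40) 8) = ue.reg .r12 := by
      u_frame hb.r12Slot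
    have s_rbx : UInt64.ofNat (s_109723.mem.readLE (ue.reg .rsp - 48) 8) = ue.reg .rbx := by
      u_frame hb.rbxSlot
    have s_f : UInt64.ofNat (s_109723.mem.readLE (ue.reg .rsp - 128) 8) = ue.reg .rdx := by
      u_frame hb.fSlot
    have s_bt : s_109723.mem.readLE (ue.reg .rsp - 132) 4 = inverse_mdct.bt ue := by
      u_frame hb.btSlot
    have s_save : s_109723.mem.readLE (ue.reg .rsp - 152) 4 = A.T := by
      u_frame hb.saveSlot
    have s_v : s_109723.mem.readLE (ue.reg .rsp - 112) 8 = inverse_mdct.tmp A ue := by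
      u_frame hb.vSlot
    have s_u : UInt64.ofNat (s_109723.mem.readLE (ue.reg .rsp - 64) 8) = ue.reg .rdi := by
      u_frame hat.sBuf.uSlot
    have s_n : s_109723.mem.readLE (ue.reg .rsp - 76) 4 = inverse_mdct.n ue := by
      u_frame hat.sBuf.nSlot
    have s_umid : s_109723.mem.readLE (ue.reg .rsp - 176) 8 = inverse_mdct.buf ue + 4 * (inverse_mdct.n ue / 2) := by
      u_frame hat.sBuf.uMidSlot
    have s_a : s_109723.mem.readLE (ue.reg .rsp - 72) 8 = inverse_mdct.tabA ue := by
      u_frame hat.sA.aSlot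
    have s_n2 : s_109723.mem.readLE (ue.reg .rsp - 120) 4 = inverse_mdct.n ue / 2 := by
      u_frame hat.sA.n2Slot
    have s_n2x4 : s_109723.mem.readLE (ue.reg .rsp - 144) 8 = 4 * (inverse_mdct.n ue / 2) := by
      u_frame hat.sA.n2x4Slot
    have s_n8 : s_109723.mem.readLE (ue.reg .rsp - 148) 4 = inverse_mdct.n ue / 8 := by
      u_frame hat.sA.n8Slot
    have s_m32 : s_109723.mem.readLE (ue.reg .rsp - 160) 8 = 4 * (inverse_mdct.n ue / 2) - 32 := by
      u_frame hat.sS2.n2x4m32Slot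
    have s_n4x4 : s_109723.mem.readLE (ue.reg .rsp - 168) 8 = 4 * (inverse_mdct.n ue / 4) := by
      u_frame hat.sS2.n4x4Slot
    have s_n4 : s_109723.mem.readLE (ue.reg .rsp - 136) 4 = inverse_mdct.n ue / 4 := by
      u_frame hat.n4Slot
    -- the footprint of the segment in the form `Body.carry` takes
    have hs3 : Mem.SameExcept [⟨(ue.reg .rsp).toNat - 368, (ue.reg .rsp).toNat⟩,
        ⟨inverse_mdct.buf ue, inverse_mdct.buf ue + 4 * inverse_mdct.n ue⟩,
        ⟨inverse_mdct.tmp A ue, inverse_mdct.tmp A ue + 2 * inverse_mdct.n ue⟩] v.mem s_109723.mem := by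
      u_same
    have habi : abiInv s_109723 := by
      v_inv
    have hrbp : s_109723.reg .rbp = ue.reg .rsp - 8 := by
      rw [w_kept .rbp rfl]
      exact hb.rbp
    have hbody := hb.carry hs3 w_eq habi hrbp w_rsp s_ret s_rbp s_r15 s_r14 s_r13 s_r12 s_rbx s_f s_bt s_save s_v
    exact
      { rip := w_rip
        body := hbody
        sBuf := ⟨s_u, s_n, s_umid⟩
        sA := ⟨s_a, s_n2, s_n2x4, s_n8⟩
        sS2 := ⟨s_m32, s_n4x4⟩
        n4Slot := s_n4 }

end Vorbis.Spec.inverse_mdct_4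

/-- Unit `inverse_mdct.4`: the statement, from the segment lemma `seg4`. -/
theorem Vorbis.Spec.Worked.inverse_mdct_4_ok : Vorbis.Spec.inverse_mdct_4.Statement := by
  intro Lay hLay μ hμ u₀ hcode hload4 hstore4
  exact Vorbis.Spec.inverse_mdct_4.seg4 Lay hLay μ hμ u₀ hcode hload4 hstore4
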